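-- pv_equiv track=rewrite | github.com/Nok1sh/algorithms_hw3 | task16_hw3.py | func
-- ===== SOURCE A (Python) =====
-- def func(n, m):
--
--     half_len = n//2
--
--     maximum_sum = m * half_len
--
--     dp = []  #  первый индекс - количество используемых цифр, второй - сумма
--     for _ in range(half_len+1):
--         dp.append([0] * (maximum_sum+1))
--
--     dp[0][0] = 1
--
--     for i in range(1, half_len+1):
--         for s in range(0, maximum_sum+1):
--             current_sum = 0
--             for digit in range(m):
--                 if s - digit >= 0:
--                     current_sum += dp[i-1][s-digit]
--
--             dp[i][s] = current_sum
--
--     result = 0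
--     for s in range(maximum_sum+1):
--         result += dp[half_len][s]**2
--     return result
-- ===== SOURCE B (Python) =====
-- def func(n, m):
--     half = n // 2
--     top = m * half
--     row = [1] + [0] * top
--     for _ in range(half):
--         pref = [0]
--         acc = 0
--         for x in row:
--             acc += x
--             pref.append(acc)
--         row = [pref[s + 1] - pref[max(0, s - m + 1)] for s in range(top + 1)]
--     return sum(x * x for x in row)
-- ===== Notes on version B (the rewrite author's own statement) =====
-- stated objective: faster
-- what changed: Replaces the O(m) inner digit loop by prefix sums over the previous DP row (each entry becomes a difference of two prefix sums), and keeps only one rolling row instead of the full 2-D table.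
import Mathlib
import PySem

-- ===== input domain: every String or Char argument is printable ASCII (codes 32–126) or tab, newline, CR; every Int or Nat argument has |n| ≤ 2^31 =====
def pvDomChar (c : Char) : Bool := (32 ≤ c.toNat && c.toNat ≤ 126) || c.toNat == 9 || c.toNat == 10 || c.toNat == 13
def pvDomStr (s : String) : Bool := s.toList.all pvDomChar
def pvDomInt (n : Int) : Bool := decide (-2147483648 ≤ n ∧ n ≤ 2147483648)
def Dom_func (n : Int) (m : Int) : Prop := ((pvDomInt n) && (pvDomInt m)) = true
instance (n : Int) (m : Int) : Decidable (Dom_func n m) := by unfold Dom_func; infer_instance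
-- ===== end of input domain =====

-- B replaces A's O(m) inner digit loop by prefix sums over the previous DP row and keeps one rolling row instead of the 2-D table (objective: faster, asymptotic).

-- ===== PORT A =====
def func (n : Int) (m : Int) : Int :=
  let half_len := PySem.Int.floordiv n 2
  let maximum_sum := m * half_len
  let dp : List (List Int) :=
    (PySem.List.pyRange 0 (half_len + 1) 1).foldl
      (fun dp _ => dp ++ [List.replicate (maximum_sum + 1).toNat 0]) []
  let dp := PySem.List.pySetD dp 0 (PySem.List.pySetD (PySem.List.pyGetD dp 0 []) 0 1)
  let dp :=
    (PySem.List.pyRange 1 (half_len + 1) 1).foldl (fun dp i =>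
      (PySem.List.pyRange 0 (maximum_sum + 1) 1).foldl (fun dp s =>
        let current_sum :=
          (PySem.List.pyRange 0 m 1).foldl (fun cs digit =>
            if s - digit ≥ 0 then
              cs + PySem.List.pyGetD (PySem.List.pyGetD dp (i - 1) []) (s - digit) 0
            else cs) 0
        PySem.List.pySetD dp i (PySem.List.pySetD (PySem.List.pyGetD dp i []) s current_sum)) dp) dp
  (PySem.List.pyRange 0 (maximum_sum + 1) 1).foldl
    (fun result s => result + (PySem.List.pyGetD (PySem.List.pyGetD dp half_len []) s 0) ^ 2) 0

-- ===== PORT B =====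
def func_alt (n : Int) (m : Int) : Int :=
  let half := PySem.Int.floordiv n 2
  let top := m * half
  let row : List Int := 1 :: List.replicate top.toNat 0
  let row :=
    (PySem.List.pyRange 0 half 1).foldl (fun row _ =>
      let pa := row.foldl (fun (pa : List Int × Int) x => (pa.1 ++ [pa.2 + x], pa.2 + x)) ([0], 0)
      (PySem.List.pyRange 0 (top + 1) 1).map (fun s =>
        PySem.List.pyGetD pa.1 (s + 1) 0 - PySem.List.pyGetD pa.1 (max 0 (s - m + 1)) 0)) row
  row.foldl (fun acc x => acc + x * x) 0

-- ===== PRECONDITION & SPEC =====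
-- Pre_ excludes exactly the inputs on which A raises IndexError: n < 0 (the DP table is empty),
-- and n >= 2 with m < 0 (the DP rows are empty, so dp[0][0] fails).
def Pre_func (n : Int) (m : Int) : Prop := 0 ≤ n ∧ (0 ≤ m ∨ n < 2)
instance (n : Int) (m : Int) : Decidable (Pre_func n m) := by unfold Pre_func; infer_instance
def pvWitness_func : Int × Int := (4, 2)

def Spec_func (n : Int) (m : Int) (out : Int) : Prop := out = func_alt n m
instance (n : Int) (m : Int) (out : Int) : Decidable (Spec_func n m out) := by unfold Spec_func; infer_instance

-- ===== CLAIM (what is proved, stated in full; the proofs are below) =====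
def Claim_equal_func : Prop := ∀ (n : Int) (m : Int), Dom_func n m → Pre_func n m → Spec_func n m (func n m)

-- ===== LEMMAS AND PROOFS =====

def winsum (prev : List Int) (mm s : Nat) : Int := ((prev.take (s + 1)).drop (s + 1 - mm)).sum

theorem scan_fold (l : List Int) (p0 : List Int) (a0 : Int) :
    l.foldl (fun (pa : List Int × Int) x => (pa.1 ++ [pa.2 + x], pa.2 + x)) (p0, a0)
    = (p0 ++ (List.range l.length).map (fun k => a0 + (l.take (k+1)).sum), a0 + l.sum) := by
  induction l generalizing p0 a0 with
  | nil => simp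
  | cons x t ih =>
    simp only [List.foldl_cons]
    rw [ih]
    rw [List.length_cons, List.range_succ_eq_map]
    simp [Function.comp, add_assoc]

theorem pref_getD (prev : List Int) (k : Nat) (hk : k ≤ prev.length) :
    PySem.List.pyGetD (prev.foldl (fun (pa : List Int × Int) x => (pa.1 ++ [pa.2 + x], pa.2 + x)) ([0], 0)).1 (k : Int) 0
    = (prev.take k).sum := by
  rw [scan_fold]
  simp only [PySem.List.pyGetD_natCast]
  cases k with
  | zero => simp
  | succ j =>
    have hj : j < prev.length := by omega
    simp [List.getD, hj]

theorem window_diff (prev : List Int) (mm s : Nat) :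
    (prev.take (s+1)).sum - (prev.take (s+1-mm)).sum = winsum prev mm s := by
  unfold winsum
  have h : prev.take (s+1-mm) = (prev.take (s+1)).take (s+1-mm) := by
    rw [List.take_take, min_eq_left (by omega)]
  have h2 : ((prev.take (s+1)).take (s+1-mm)).sum + ((prev.take (s+1)).drop (s+1-mm)).sum = (prev.take (s+1)).sum := List.sum_take_add_sum_drop _ _
  rw [h]
  linarith

theorem Ainner (prev : List Int) (mm s : Nat) (hs : s < prev.length) :
    (PySem.List.pyRange 0 (mm:Int) 1).foldl
      (fun cs digit => if (s:Int) - digit ≥ 0 then cs + PySem.List.pyGetD prev ((s:Int) - digit) 0 else cs) 0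
    = winsum prev mm s := by
  induction mm with
  | zero =>
    simp only [Nat.cast_zero, PySem.List.pyRange_one_eq_nil le_rfl, List.foldl_nil, winsum]
    rw [List.drop_eq_nil_of_le (by simp)]
    rfl
  | succ mm ih =>
    have hcast : ((mm+1 : Nat) : Int) = (mm : Int) + 1 := by push_cast; ring
    rw [hcast, PySem.List.pyRange_one_succ_right (by positivity), List.foldl_append]
    rw [ih]
    simp only [List.foldl_cons, List.foldl_nil]
    by_cases hcase : mm ≤ s
    · have hge : (s : Int) - (mm : Int) ≥ 0 := by omega
      rw [if_pos hge]
      have hidx : (s : Int) - (mm : Int) = ((s - mm : Nat) : Int) := by omega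
      rw [hidx, PySem.List.pyGetD_natCast, List.getD_eq_getElem _ _ (by omega)]
      have hlt : s - mm < (prev.take (s+1)).length := by
        simp [List.length_take]; omega
      have key : (prev.take (s+1)).drop (s-mm)
          = (prev.take (s+1))[s-mm] :: (prev.take (s+1)).drop (s-mm+1) :=
        List.drop_eq_getElem_cons hlt
      unfold winsum
      have e1 : s + 1 - (mm+1) = s - mm := by omega
      have e2 : s + 1 - mm = s - mm + 1 := by omega
      rw [e1, e2, key, List.sum_cons, List.getElem_take]
      ring
    · rw [if_neg (by omega)]
      unfold winsum
      have e : s + 1 - mm = s + 1 - (mm+1) := by omega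
      rw [e]

theorem inner_fold (T i : Nat) (F : List (List Int) → Int → Int)
    (hF : ∀ d r s, F (d.set i r) s = F d s) :
    ∀ (c a : Nat) (dp : List (List Int)), i < dp.length → a + c = T + 1 →
      (dp.getD i []).length = T + 1 →
      (PySem.List.pyRange (a : Int) ((T:Int)+1) 1).foldl
        (fun dp s => PySem.List.pySetD dp (i:Int)
          (PySem.List.pySetD (PySem.List.pyGetD dp (i:Int) []) s (F dp s))) dp
      = dp.set i ((dp.getD i []).take a ++ (List.range' a c).map (fun s => F dp ((s:Nat):Int))) := by
  intro c
  induction c with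
  | zero =>
    intro a dp hi ha hlen
    have hnil : ((T:Int)+1) ≤ (a:Int) := by omega
    rw [PySem.List.pyRange_one_eq_nil hnil]
    simp only [List.foldl_nil, List.range'_zero, List.map_nil, List.append_nil]
    rw [show a = (dp.getD i []).length from by omega, List.take_length,
      List.getD_eq_getElem _ _ hi, List.set_getElem_self]
  | succ c ih =>
    intro a dp hi ha hlen
    rw [PySem.List.pyRange_one_cons (by omega), List.foldl_cons]
    have hrow : a < (dp.getD i []).length := by omega
    have hstep : PySem.List.pySetD dp (i:Int)
        (PySem.List.pySetD (PySem.List.pyGetD dp (i:Int) []) (a:Int) (F dp (a:Int)))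
        = dp.set i ((dp.getD i []).set a (F dp (a:Int))) := by
      simp only [PySem.List.pySetD_natCast, PySem.List.pyGetD_natCast]
    rw [hstep]
    have hgd : ((dp.set i ((dp.getD i []).set a (F dp (a:Int)))).getD i [])
        = (dp.getD i []).set a (F dp (a:Int)) := by
      rw [List.getD_eq_getElem _ _ (by simpa using hi), List.getElem_set_self]
    have hcast : (a:Int) + 1 = ((a+1 : Nat) : Int) := by push_cast; ring
    rw [hcast, ih (a+1) _ (by simpa using hi) (by omega) (by rw [hgd]; simpa using hlen)]
    rw [List.set_set, hgd]
    congr 1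
    have htake : ((dp.getD i []).set a (F dp (a:Int))).take (a+1)
        = (dp.getD i []).take a ++ [F dp (a:Int)] := by
      rw [List.set_eq_take_append_cons_drop, if_pos hrow]
      rw [show a + 1 = ((dp.getD i []).take a).length + 1 from by
        rw [List.length_take, min_eq_left (le_of_lt hrow)]]
      rw [List.take_append]
      simp
    rw [htake, List.range'_succ, List.map_cons]
    have hmap : (List.range' (a+1) c).map
        (fun s => F (dp.set i ((dp.getD i []).set a (F dp (a:Int)))) ((s:Nat):Int))
        = (List.range' (a+1) c).map (fun s => F dp ((s:Nat):Int)) := by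
      apply List.map_congr_left
      intro s _
      exact hF _ _ _
    rw [hmap]
    simp [List.append_assoc]

def rowsRef (mm T : Nat) : Nat → List Int
  | 0 => 1 :: List.replicate T 0
  | i + 1 => (List.range (T + 1)).map (fun s => winsum (rowsRef mm T i) mm s)

theorem rowsRef_length (mm T i : Nat) : (rowsRef mm T i).length = T + 1 := by
  cases i <;> simp [rowsRef]

theorem build_eq (h T : Nat) :
    (PySem.List.pyRange 0 ((h:Nat):Int) 1).foldl
      (fun dp _ => dp ++ [List.replicate (T+1) (0:Int)]) ([] : List (List Int))
    = List.replicate h (List.replicate (T+1) 0) := by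
  rw [PySem.List.foldl_append_singleton_eq_map]
  simp [List.map_const', PySem.List.length_pyRange_one]

theorem dpk_getD_mid (mm T h k : Nat) (_hk : k ≤ h) (j : Nat) (hj : j ≤ k) :
    ((List.range (k+1)).map (rowsRef mm T) ++ List.replicate (h-k) (List.replicate (T+1) (0:Int))).getD j []
    = rowsRef mm T j := by
  unfold List.getD
  rw [List.getElem?_append_left (by simp; omega), List.getElem?_map,
    List.getElem?_range (by omega)]
  rfl

theorem dpk_getD_next (mm T h k : Nat) (hk : k < h) :
    ((List.range (k+1)).map (rowsRef mm T) ++ List.replicate (h-k) (List.replicate (T+1) (0:Int))).getD (k+1) []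
    = List.replicate (T+1) 0 := by
  unfold List.getD
  rw [List.getElem?_append_right (by simp)]
  simp [hk]

theorem outer_fold (mm T h : Nat) : ∀ k, k ≤ h →
    (PySem.List.pyRange 1 ((k:Int)+1) 1).foldl
      (fun dp i => (PySem.List.pyRange 0 ((T:Int)+1) 1).foldl (fun dp s =>
        PySem.List.pySetD dp i (PySem.List.pySetD (PySem.List.pyGetD dp i [])
          s ((PySem.List.pyRange 0 ((mm:Nat):Int) 1).foldl (fun cs digit =>
            if s - digit ≥ 0 then cs + PySem.List.pyGetD (PySem.List.pyGetD dp (i-1) []) (s - digit) 0 else cs) 0))) dp)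
      (rowsRef mm T 0 :: List.replicate h (List.replicate (T+1) 0))
    = (List.range (k+1)).map (rowsRef mm T) ++ List.replicate (h-k) (List.replicate (T+1) 0) := by
  intro k
  induction k with
  | zero =>
    intro _
    simp only [Nat.cast_zero]
    rw [PySem.List.pyRange_one_eq_nil (a:=1) (b:=(0:Int)+1) (by norm_num)]
    simp [List.range_succ, rowsRef]
  | succ k ih =>
    intro hk
    have hcast : ((k+1 : Nat) : Int) + 1 = (((k:Int)+1) + 1) := by push_cast; ring
    rw [hcast, PySem.List.pyRange_one_succ_right (a:=1) (b:=(k:Int)+1) (by omega), List.foldl_append,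
      ih (by omega), List.foldl_cons, List.foldl_nil]
    set dpk := (List.range (k+1)).map (rowsRef mm T) ++ List.replicate (h-k) (List.replicate (T+1) (0:Int)) with hdpk
    have hlen : dpk.length = h + 1 := by simp [hdpk]; omega
    have hicast : ((k:Int)+1) = (((k+1:Nat)):Int) := by push_cast; ring
    rw [hicast]
    have happ := inner_fold T (k+1)
      (fun dp s => ((PySem.List.pyRange 0 ((mm:Nat):Int) 1).foldl (fun cs digit =>
            if s - digit ≥ 0 then cs + PySem.List.pyGetD (PySem.List.pyGetD dp ((((k+1:Nat)):Int)-1) []) (s - digit) 0 else cs) 0))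
      (by
        intro d r s
        beta_reduce
        have : PySem.List.pyGetD (d.set (k+1) r) ((((k+1:Nat)):Int)-1) []
            = PySem.List.pyGetD d ((((k+1:Nat)):Int)-1) [] := by
          have e : (((k+1:Nat)):Int) - 1 = ((k:Nat):Int) := by push_cast; ring
          rw [e, PySem.List.pyGetD_natCast, PySem.List.pyGetD_natCast]
          unfold List.getD
          rw [List.getElem?_set_ne (by omega)]
        rw [this])
      (T+1) 0 dpk (by omega) (by omega)
      (by rw [dpk_getD_next mm T h k (by omega)]; simp)
    beta_reduce at happ
    simp only [Nat.cast_zero] at happ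
    rw [happ]
    simp only [List.take_zero, List.nil_append]
    have hval : (List.range' 0 (T+1)).map (fun s =>
        ((PySem.List.pyRange 0 ((mm:Nat):Int) 1).foldl (fun cs digit =>
            if ((s:Nat):Int) - digit ≥ 0 then cs + PySem.List.pyGetD (PySem.List.pyGetD dpk ((((k+1:Nat)):Int)-1) []) (((s:Nat):Int) - digit) 0 else cs) 0))
        = rowsRef mm T (k+1) := by
      have e : (((k+1:Nat)):Int) - 1 = ((k:Nat):Int) := by push_cast; ring
      have hprev : PySem.List.pyGetD dpk ((k:Nat):Int) [] = rowsRef mm T k := by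
        rw [PySem.List.pyGetD_natCast, hdpk, dpk_getD_mid mm T h k (by omega) k le_rfl]
      rw [show rowsRef mm T (k+1) = (List.range (T+1)).map (fun s => winsum (rowsRef mm T k) mm s) from rfl,
        List.range_eq_range']
      apply List.map_congr_left
      intro s hs
      have hs' : s < T + 1 := by
        have := List.mem_range'_1.mp hs; omega
      rw [e, hprev]
      exact Ainner (rowsRef mm T k) mm s (by rw [rowsRef_length]; omega)
    rw [hval]
    have hset : dpk.set (k+1) (rowsRef mm T (k+1))
        = (List.range (k+2)).map (rowsRef mm T) ++ List.replicate (h-(k+1)) (List.replicate (T+1) 0) := by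
      rw [hdpk]
      have hrep : List.replicate (h-k) (List.replicate (T+1) (0:Int))
          = List.replicate (T+1) 0 :: List.replicate (h-k-1) (List.replicate (T+1) 0) := by
        rw [← List.replicate_succ]
        congr 1
        omega
      rw [hrep, List.set_append_right _ _ (by simp)]
      simp only [List.length_map, List.length_range, Nat.sub_self, List.set_cons_zero]
      rw [show List.range (k+2) = List.range (k+1) ++ [k+1] from List.range_succ,
        List.map_append]
      simp [show h - k - 1 = h - (k+1) from by omega]
    rw [hset]

theorem build_eq2 (h T : Nat) :
    (PySem.List.pyRange 0 ((h:Int)+1) 1).foldl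
      (fun dp _ => dp ++ [List.replicate (T+1) (0:Int)]) ([] : List (List Int))
    = List.replicate (h+1) (List.replicate (T+1) 0) := by
  have hb := build_eq (h+1) T
  rw [show (((h+1:Nat)):Int) = (h:Int)+1 from by push_cast; ring] at hb
  exact hb

theorem A_eval (mm h : Nat) (n : Int) (hh : PySem.Int.floordiv n 2 = ((h:Nat):Int)) :
    func n ((mm:Nat):Int) = (rowsRef mm (mm*h) h).foldl (fun acc x => acc + x^2) 0 := by
  simp only [func]
  rw [hh]
  rw [show ((mm:Nat):Int) * ((h:Nat):Int) = (((mm*h:Nat)):Int) from by push_cast; ring]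
  set T := mm*h with hT
  rw [show (((T:Nat):Int)+1).toNat = T+1 from by omega]
  rw [build_eq2 h T]
  rw [List.replicate_succ]
  have hinit : PySem.List.pySetD (List.replicate (T+1) (0:Int) :: List.replicate h (List.replicate (T+1) 0)) 0
      (PySem.List.pySetD (PySem.List.pyGetD (List.replicate (T+1) (0:Int) :: List.replicate h (List.replicate (T+1) 0)) 0 []) 0 1)
      = rowsRef mm T 0 :: List.replicate h (List.replicate (T+1) 0) := by
    rw [PySem.List.pyGetD_zero_cons, PySem.List.pySetD_of_nonneg _ _ le_rfl,
      PySem.List.pySetD_of_nonneg _ _ le_rfl]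
    norm_num
    rfl
  rw [hinit]
  rw [outer_fold mm T h h le_rfl]
  simp only [Nat.sub_self, List.replicate_zero, List.append_nil]
  have hget : ∀ s : Int, PySem.List.pyGetD ((List.range (h+1)).map (rowsRef mm T)) ((h:Nat):Int) []
      = rowsRef mm T h := by
    intro _
    rw [PySem.List.pyGetD_natCast]
    unfold List.getD
    rw [List.getElem?_map, List.getElem?_range (by omega)]
    rfl
  rw [hget 0]
  have hlen : ((T:Nat):Int) + 1 = ((rowsRef mm T h).length : Int) := by
    rw [rowsRef_length]; push_cast; ring
  rw [hlen, PySem.List.foldl_pyRange_zero_pyGetD' (rowsRef mm T h) 0 (fun acc x => acc + x^2) 0]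

theorem B_step (mm T : Nat) (prev : List Int) (hlen : prev.length = T+1) :
    (PySem.List.pyRange 0 (((T:Nat):Int)+1) 1).map (fun s =>
      PySem.List.pyGetD (prev.foldl (fun (pa : List Int × Int) x => (pa.1 ++ [pa.2 + x], pa.2 + x)) ([0], 0)).1 (s+1) 0
      - PySem.List.pyGetD (prev.foldl (fun (pa : List Int × Int) x => (pa.1 ++ [pa.2 + x], pa.2 + x)) ([0], 0)).1 (max 0 (s - ((mm:Nat):Int) + 1)) 0)
    = (List.range (T+1)).map (fun s => winsum prev mm s) := by
  rw [show ((T:Nat):Int)+1 = (((T+1:Nat)):Int) from by push_cast; ring,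
    PySem.List.pyRange_zero_natCast, List.map_map]
  apply List.map_congr_left
  intro s hs
  have hs' : s < T + 1 := List.mem_range.mp hs
  simp only [Function.comp]
  rw [show ((s:Nat):Int)+1 = (((s+1:Nat)):Int) from by push_cast; ring,
    pref_getD prev (s+1) (by omega),
    show max 0 (((s:Nat):Int) - ((mm:Nat):Int) + 1) = (((s+1-mm:Nat)):Int) from by omega,
    pref_getD prev (s+1-mm) (by omega)]
  exact window_diff prev mm s

theorem B_loop (mm T : Nat) : ∀ k : Nat,
    (PySem.List.pyRange 0 ((k:Nat):Int) 1).foldl (fun row _ =>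
      (PySem.List.pyRange 0 (((T:Nat):Int)+1) 1).map (fun s =>
        PySem.List.pyGetD (row.foldl (fun (pa : List Int × Int) x => (pa.1 ++ [pa.2 + x], pa.2 + x)) ([0], 0)).1 (s+1) 0
        - PySem.List.pyGetD (row.foldl (fun (pa : List Int × Int) x => (pa.1 ++ [pa.2 + x], pa.2 + x)) ([0], 0)).1 (max 0 (s - ((mm:Nat):Int) + 1)) 0))
      (rowsRef mm T 0)
    = rowsRef mm T k := by
  intro k
  induction k with
  | zero =>
    simp only [Nat.cast_zero]
    rw [PySem.List.pyRange_one_eq_nil (a:=0) (b:=0) le_rfl, List.foldl_nil]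
  | succ k ih =>
    rw [show ((k+1:Nat):Int) = ((k:Nat):Int)+1 from by push_cast; ring,
      PySem.List.pyRange_one_succ_right (a:=0) (b:=(k:Nat)) (by positivity),
      List.foldl_append, ih, List.foldl_cons, List.foldl_nil,
      B_step mm T (rowsRef mm T k) (rowsRef_length mm T k)]
    rfl

theorem B_eval (mm h : Nat) (n : Int) (hh : PySem.Int.floordiv n 2 = ((h:Nat):Int)) :
    func_alt n ((mm:Nat):Int) = (rowsRef mm (mm*h) h).foldl (fun acc x => acc + x*x) 0 := by
  simp only [func_alt]
  rw [hh, show ((mm:Nat):Int) * ((h:Nat):Int) = (((mm*h:Nat)):Int) from by push_cast; ring]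
  set T := mm*h with hT
  rw [show (((T:Nat):Int)).toNat = T from by omega]
  rw [show (1 : Int) :: List.replicate T 0 = rowsRef mm T 0 from rfl]
  rw [B_loop mm T h]

theorem trivial_eq (n m : Int) (h0 : PySem.Int.floordiv n 2 = 0) : func n m = func_alt n m := by
  simp only [func, func_alt]
  rw [h0]
  norm_num
  decide


-- ===== VERDICT (by name: the statement is the Claim_ definition above) =====
theorem func_spec : Claim_equal_func := by
  unfold Claim_equal_func
  intro n m _ hpre
  unfold Spec_func
  obtain ⟨hn, hor⟩ := hpre
  by_cases hm : 0 ≤ m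
  · have hfd : 0 ≤ PySem.Int.floordiv n 2 := by
      rw [PySem.Int.floordiv_eq_ediv_of_pos (by norm_num)]
      exact Int.ediv_nonneg hn (by norm_num)
    have hh : PySem.Int.floordiv n 2 = (((PySem.Int.floordiv n 2).toNat : Nat) : Int) :=
      (Int.toNat_of_nonneg hfd).symm
    have hmm : m = ((m.toNat : Nat) : Int) := (Int.toNat_of_nonneg hm).symm
    rw [hmm, A_eval m.toNat (PySem.Int.floordiv n 2).toNat n hh,
      B_eval m.toNat (PySem.Int.floordiv n 2).toNat n hh]
    rw [show (fun (acc x : Int) => acc + x^2) = (fun acc x => acc + x*x) from by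
      funext a x; ring]
  · have h2 : n < 2 := by
      rcases hor with h | h
      · omega
      · exact h
    have h0 : PySem.Int.floordiv n 2 = 0 := by
      interval_cases n <;> decide
    exact trivial_eq n m h0
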